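-- pv_equiv track=rewrite | github.com/lensabillion/A2SV-Squid-Game | Week 1/Day 1/Earliest Possible Day of Full Bloom.py | earliestFullBloom
-- ===== SOURCE A (Python) =====
-- from typing import List
--
-- def earliestFullBloom(plantTime: List[int], growTime: List[int]) -> int:
--     next_plant = 0
--     next_bloom = 0
--     arr = [[] for _ in range(len(plantTime))]
--     for i in range(len(plantTime)):
--         arr[i].append(plantTime[i])
--         arr[i].append(growTime[i])
--     sor = sorted(arr, key = lambda x:x[1],reverse=True)
--     for i in range(len(plantTime)):
--         next_bloom = max(next_bloom, next_plant + (sor[i][0] + sor[i][1]))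
--         next_plant += sor[i][0]
--     return next_bloom
-- ===== SOURCE B (Python) =====
-- from typing import List
--
-- def earliestFullBloom(plantTime: List[int], growTime: List[int]) -> int:
--     # Schedule slow growers first; compute the bloom day by the backward recurrence
--     # bloom(seeds) = plant_first + max(grow_first, bloom(rest)), folded from the
--     # fastest-growing seed up, so no prefix plant-time sums are ever materialised.
--     order = sorted(range(len(plantTime)), key=lambda i: -growTime[i])
--     day = None
--     for i in reversed(order):
--         g = growTime[i]
--         day = plantTime[i] + (g if day is None else max(day, g))
--     return 0 if day is None else max(day, 0)
-- ===== Notes on version B (the rewrite author's own statement) =====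
-- stated objective: alternative
-- what changed: Replaces A's forward pass that accumulates a running plant-time prefix and a running max of prefix+plant+grow with a backward fold over the reverse schedule using the recurrence day = plant + max(grow, day), so no prefix sums or global max are kept.
import Mathlib
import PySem

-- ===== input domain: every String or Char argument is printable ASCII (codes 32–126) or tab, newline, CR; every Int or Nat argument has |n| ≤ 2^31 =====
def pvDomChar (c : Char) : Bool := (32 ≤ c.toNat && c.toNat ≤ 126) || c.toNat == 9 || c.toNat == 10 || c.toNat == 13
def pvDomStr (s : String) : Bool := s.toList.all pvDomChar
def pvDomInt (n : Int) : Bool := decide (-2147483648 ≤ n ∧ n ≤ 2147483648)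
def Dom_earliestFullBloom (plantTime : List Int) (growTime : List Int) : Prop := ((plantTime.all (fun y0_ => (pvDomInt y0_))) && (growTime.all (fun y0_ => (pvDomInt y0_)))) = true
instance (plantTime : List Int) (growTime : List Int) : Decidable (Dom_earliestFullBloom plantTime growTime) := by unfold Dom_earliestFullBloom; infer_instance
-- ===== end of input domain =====

-- B replaces A's forward prefix-sum-plus-running-max pass by a backward fold with
-- the recurrence day = plant + max(grow, day); same sorted greedy schedule, same values.

-- ===== PORT A =====
def earliestFullBloom (plantTime : List Int) (growTime : List Int) : Int :=
  -- next_plant = 0; next_bloom = 0; arr[i] = [plantTime[i], growTime[i]]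
  let n : Int := plantTime.length
  let arr : List (Int × Int) :=
    (PySem.List.pyRange 0 n 1).map
      (fun i => (PySem.List.pyGetD plantTime i 0, PySem.List.pyGetD growTime i 0))
  let sor := PySem.List.sorted arr (fun x => x.2) true
  let st :=
    (PySem.List.pyRange 0 n 1).foldl
      (fun (s : Int × Int) i =>
        let pg := PySem.List.pyGetD sor i (0, 0)
        (s.1 + pg.1, max s.2 (s.1 + (pg.1 + pg.2))))
      (0, 0)
  st.2

-- ===== PORT B =====
def earliestFullBloom_alt (plantTime : List Int) (growTime : List Int) : Int :=
  let n : Int := plantTime.length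
  let order := PySem.List.sorted (PySem.List.pyRange 0 n 1)
      (fun i => -(PySem.List.pyGetD growTime i 0)) false
  let day : Option Int :=
    order.reverse.foldl
      (fun (acc : Option Int) i =>
        let g := PySem.List.pyGetD growTime i 0
        some (PySem.List.pyGetD plantTime i 0 +
          (match acc with | none => g | some d => max d g)))
      none
  match day with
  | none => 0
  | some d => max d 0

-- ===== PRECONDITION & SPEC =====
-- A indexes growTime[i] for every i < len(plantTime): it raises IndexError when growTime is shorter.
def Pre_earliestFullBloom (plantTime : List Int) (growTime : List Int) : Prop :=
  plantTime.length ≤ growTime.length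
instance (plantTime : List Int) (growTime : List Int) : Decidable (Pre_earliestFullBloom plantTime growTime) := by unfold Pre_earliestFullBloom; infer_instance
def pvWitness_earliestFullBloom : List Int × List Int := ([1, 4, 3], [2, 3, 1])

def Spec_earliestFullBloom (plantTime : List Int) (growTime : List Int) (out : Int) : Prop := out = earliestFullBloom_alt plantTime growTime
instance (plantTime : List Int) (growTime : List Int) (out : Int) : Decidable (Spec_earliestFullBloom plantTime growTime out) := by unfold Spec_earliestFullBloom; infer_instance

-- ===== CLAIM =====
def Claim_equal_earliestFullBloom : Prop := ∀ (plantTime : List Int) (growTime : List Int), Dom_earliestFullBloom plantTime growTime → Pre_earliestFullBloom plantTime growTime → Spec_earliestFullBloom plantTime growTime (earliestFullBloom plantTime growTime)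

-- ===== LEMMAS AND PROOFS =====

-- Python's sorted with reverse=True is sorted on the negated integer key.
lemma sorted_rev_eq_sorted_neg_key {α : Type} (xs : List α) (key : α → Int) :
    PySem.List.sorted xs key true = PySem.List.sorted xs (fun x => -(key x)) false := by
  unfold PySem.List.sorted
  simp only [if_true, if_false, Bool.false_eq_true, neg_lt_neg_iff]

-- A stable key sort commutes with mapping the elements through f.
lemma insertBy_map {α β : Type} (f : α → β) (before : β → β → Bool) (x : α) (m : List α) :
    PySem.List.insertBy before (f x) (m.map f)
      = (PySem.List.insertBy (fun a b => before (f a) (f b)) x m).map f := by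
  induction m with
  | nil => rfl
  | cons y t ih =>
      simp only [List.map_cons, PySem.List.insertBy]
      by_cases h : before (f x) (f y) = true
      · simp [h]
      · simp [h, ih]

lemma sorted_map {α β κ : Type} [LT κ] [DecidableLT κ]
    (f : α → β) (xs : List α) (key : β → κ) :
    PySem.List.sorted (xs.map f) key false
      = (PySem.List.sorted xs (fun x => key (f x)) false).map f := by
  unfold PySem.List.sorted
  simp only [if_false, Bool.false_eq_true]
  induction xs using List.reverseRecOn with
  | nil => rfl
  | append_singleton t x ih =>
      simp only [List.map_append, List.map_cons, List.map_nil, List.foldl_append,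
        List.foldl_cons, List.foldl_nil, ih, insertBy_map]

-- A's index loop over the sorted array is the direct fold over that array.
lemma A_fold (S : List (Int × Int)) (m : Int) (hm : m = (S.length : Int)) :
    (PySem.List.pyRange 0 m 1).foldl
      (fun (s : Int × Int) i =>
        let pg := PySem.List.pyGetD S i (0, 0)
        (s.1 + pg.1, max s.2 (s.1 + (pg.1 + pg.2)))) (0, 0)
      = S.foldl (fun (s : Int × Int) pg => (s.1 + pg.1, max s.2 (s.1 + (pg.1 + pg.2)))) (0, 0) := by
  subst hm
  exact PySem.List.foldl_pyRange_zero_pyGetD' S (0, 0)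
    (fun (s : Int × Int) pg => (s.1 + pg.1, max s.2 (s.1 + (pg.1 + pg.2)))) (0, 0)

lemma max_shuffle (np p g d nb : Int) :
    max nb (np + (p + max d g)) = max (max nb (np + (p + g))) (np + p + d) := by
  simp only [max_def]; split_ifs <;> omega

-- A's forward fused pass equals the backward Option-fold recurrence.
lemma fused_eq_backward (l : List (Int × Int)) (np nb : Int) :
    (l.foldl (fun (s : Int × Int) pg => (s.1 + pg.1, max s.2 (s.1 + (pg.1 + pg.2)))) (np, nb)).2
      = match l.foldr (fun (pg : Int × Int) (acc : Option Int) =>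
            some (pg.1 + (match acc with | none => pg.2 | some d => max d pg.2))) none with
        | none => nb
        | some d => max nb (np + d) := by
  induction l generalizing np nb with
  | nil => rfl
  | cons pg t ih =>
      obtain ⟨p, g⟩ := pg
      simp only [List.foldl_cons, List.foldr_cons, ih]
      cases t.foldr (fun (pg : Int × Int) (acc : Option Int) =>
          some (pg.1 + (match acc with | none => pg.2 | some d => max d pg.2))) none with
      | none => rfl
      | some d =>
          simp only []
          exact (max_shuffle np p g d nb).symm

-- ===== VERDICT =====
theorem earliestFullBloom_spec : Claim_equal_earliestFullBloom := by
  intro p g _ hpre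
  unfold Spec_earliestFullBloom
  show earliestFullBloom p g = earliestFullBloom_alt p g
  unfold earliestFullBloom earliestFullBloom_alt
  simp only []
  set f : Int → Int × Int := fun i => (PySem.List.pyGetD p i 0, PySem.List.pyGetD g i 0) with hf
  have hlen : ((p.length : Int))
      = ((PySem.List.sorted ((PySem.List.pyRange 0 (p.length : Int) 1).map f)
            (fun x => x.2) true).length : Int) := by
    rw [PySem.List.length_sorted, List.length_map, PySem.List.length_pyRange_one]
    omega
  have key_eq : PySem.List.sorted ((PySem.List.pyRange 0 (p.length : Int) 1).map f)
        (fun x => x.2) true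
      = (PySem.List.sorted (PySem.List.pyRange 0 (p.length : Int) 1)
          (fun i => -(PySem.List.pyGetD g i 0)) false).map f := by
    rw [sorted_rev_eq_sorted_neg_key, sorted_map]
  rw [A_fold _ _ hlen, fused_eq_backward, key_eq, List.foldr_map, List.foldl_reverse]
  cases (PySem.List.sorted (PySem.List.pyRange 0 (p.length : Int) 1)
      (fun i => -(PySem.List.pyGetD g i 0)) false).foldr
      (fun i (acc : Option Int) =>
        some (PySem.List.pyGetD p i 0 +
          (match acc with
           | none => PySem.List.pyGetD g i 0
           | some d => max d (PySem.List.pyGetD g i 0)))) none with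
  | none => rfl
  | some d =>
      simp only []
      rw [zero_add, max_comm]
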